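-- pv_equiv track=rewrite | github.com/isavita/advent_generated | training_data/reflection-tuning/day20_part1_2016.py | find_lowest_unblocked_ip
-- ===== SOURCE A (Python) =====
-- def merge_ranges(ranges):
--     ranges.sort(key=lambda x: x[0])
--     merged = []
--     for start, end in ranges:
--         if not merged or start > merged[-1][1] + 1:
--             merged.append([start, end])
--         else:
--             merged[-1][1] = max(merged[-1][1], end)
--     return merged
--
-- def find_lowest_unblocked_ip(ranges):
--     merged = merge_ranges(ranges)
--     if merged[0][0] > 0:
--         return 0
--     for i in range(len(merged) - 1):
--         if merged[i][1] + 1 < merged[i+1][0]: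
--             return merged[i][1] + 1
--     return merged[-1][1] + 1
-- ===== SOURCE B (Python) =====
-- def find_lowest_unblocked_ip(ranges):
--     # Single-pass sweep over the sorted ranges; like A, sorts `ranges` in place.
--     ranges.sort(key=lambda x: x[0])
--     s0, cand = ranges[0]
--     if s0 > 0:
--         return 0
--     for s, e in ranges[1:]:
--         if s > cand + 1:
--             break
--         if e > cand:
--             cand = e
--     return cand + 1
-- ===== Notes on version B (the rewrite author's own statement) =====
-- stated objective: simpler
-- what changed: B replaces A's two-phase merge (build a merged-interval list, then re-scan it for a gap) with one sweep over the sorted ranges that maintains a single 'highest blocked' integer and stops at the first gap, building no intermediate list.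
import Mathlib
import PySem

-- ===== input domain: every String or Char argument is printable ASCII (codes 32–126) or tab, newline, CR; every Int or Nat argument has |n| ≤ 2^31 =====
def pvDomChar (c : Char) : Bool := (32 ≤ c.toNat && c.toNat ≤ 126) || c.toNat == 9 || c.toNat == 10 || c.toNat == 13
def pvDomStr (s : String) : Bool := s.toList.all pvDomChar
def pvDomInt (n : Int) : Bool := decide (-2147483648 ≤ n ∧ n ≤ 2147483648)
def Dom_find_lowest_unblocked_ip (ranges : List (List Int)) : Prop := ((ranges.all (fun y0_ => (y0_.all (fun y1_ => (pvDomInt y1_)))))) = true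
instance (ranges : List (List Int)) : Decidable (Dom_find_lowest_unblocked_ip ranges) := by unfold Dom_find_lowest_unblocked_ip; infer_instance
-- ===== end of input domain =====

-- B replaces A's merge-then-scan with a single sweep over the sorted ranges keeping one
-- 'highest blocked' integer (simpler, no intermediate list). Both A and B sort `ranges`
-- in place in Python; the equivalence proved here is about the return value.


-- ===== PORT A =====
-- Tuple unpacking 'start, end = r' for a two-element list (Pre_ guarantees length 2).
def pvPair (r : List Int) : Int × Int :=
  match r with
  | [s, e] => (s, e)
  | _ => (0, 0)

-- the body of A's merge loop: one step of 'for start, end in ranges: …'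
def pvMergeStep (merged : List (List Int)) (r : List Int) : List (List Int) :=
  let se := pvPair r
  match merged.getLast? with
  | none => merged ++ [[se.1, se.2]]
  | some last =>
    if se.1 > (pvPair last).2 + 1 then merged ++ [[se.1, se.2]]
    else merged.dropLast ++ [[(pvPair last).1, max ((pvPair last).2) se.2]]

def merge_ranges (ranges : List (List Int)) : List (List Int) :=
  (PySem.List.sorted ranges (key := fun x => x.headI)).foldl pvMergeStep []

-- A's 'for i in range(len(merged)-1)' over adjacent pairs, plus the final return
def pvGapScan (merged : List (List Int)) : Int :=
  match merged with
  | [] => 0                                   -- unreachable: merged is nonempty under Pre_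
  | [r] => (pvPair r).2 + 1
  | r :: r' :: rest =>
    if (pvPair r).2 + 1 < (pvPair r').1 then (pvPair r).2 + 1
    else pvGapScan (r' :: rest)

def find_lowest_unblocked_ip (ranges : List (List Int)) : Int :=
  let merged := merge_ranges ranges
  if (pvPair merged.headI).1 > 0 then 0
  else pvGapScan merged

-- ===== PORT B =====
def pvSweep (rest : List (List Int)) (cand : Int) : Int :=
  match rest with
  | [] => cand + 1
  | r :: rest' =>
    let se := pvPair r
    if se.1 > cand + 1 then cand + 1        -- 'break'
    else pvSweep rest' (if se.2 > cand then se.2 else cand)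

def find_lowest_unblocked_ip_alt (ranges : List (List Int)) : Int :=
  let sorted := PySem.List.sorted ranges (key := fun x => x.headI)
  let se0 := pvPair sorted.headI
  if se0.1 > 0 then 0
  else pvSweep sorted.tail se0.2

-- ===== PRECONDITION & SPEC =====
-- A raises on the empty list (IndexError at merged[0]) and on any inner list that is not a
-- pair (ValueError at 'for start, end in ranges'); exactly those inputs are excluded.
def Pre_find_lowest_unblocked_ip (ranges : List (List Int)) : Prop :=
  ranges ≠ [] ∧ ∀ r ∈ ranges, r.length = 2
instance (ranges : List (List Int)) : Decidable (Pre_find_lowest_unblocked_ip ranges) := by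
  unfold Pre_find_lowest_unblocked_ip; infer_instance

def pvWitness_find_lowest_unblocked_ip : List (List Int) := [[5, 8], [0, 2], [4, 7]]

def Spec_find_lowest_unblocked_ip (ranges : List (List Int)) (out : Int) : Prop := out = find_lowest_unblocked_ip_alt ranges
instance (ranges : List (List Int)) (out : Int) : Decidable (Spec_find_lowest_unblocked_ip ranges out) := by unfold Spec_find_lowest_unblocked_ip; infer_instance

-- ===== CLAIM (what is proved, stated in full; the proofs are below) =====
def Claim_equal_find_lowest_unblocked_ip : Prop := ∀ (ranges : List (List Int)), Dom_find_lowest_unblocked_ip ranges → Pre_find_lowest_unblocked_ip ranges → Spec_find_lowest_unblocked_ip ranges (find_lowest_unblocked_ip ranges)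

-- ===== LEMMAS AND PROOFS =====

-- one merge step on an accumulator written as acc ++ [last]
theorem pvMergeStep_concat (acc : List (List Int)) (last r : List Int) :
    pvMergeStep (acc ++ [last]) r =
      if (pvPair r).1 > (pvPair last).2 + 1 then acc ++ [last] ++ [[(pvPair r).1, (pvPair r).2]]
      else acc ++ [[(pvPair last).1, max (pvPair last).2 (pvPair r).2]] := by
  simp [pvMergeStep]

-- Once the accumulator has at least two blocks, the merge fold never touches the first
-- block, and the start of the second block is preserved.
theorem foldl_mergeStep_frozen (l : List (List Int)) :
    ∀ (x y : List Int) (ys : List (List Int)),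
    ∃ zs, l.foldl pvMergeStep (x :: y :: ys) = x :: zs ∧ zs ≠ [] ∧
      (pvPair zs.headI).1 = (pvPair y).1 := by
  induction l with
  | nil => exact fun x y ys => ⟨y :: ys, rfl, by simp, rfl⟩
  | cons r rest ih =>
    intro x y ys
    show ∃ zs, rest.foldl pvMergeStep (pvMergeStep (x :: y :: ys) r) = x :: zs ∧ zs ≠ [] ∧
      (pvPair zs.headI).1 = (pvPair y).1
    obtain ⟨init, last, hinit0⟩ := ((y :: ys).eq_nil_or_concat).resolve_left (by simp)
    have hinit : y :: ys = init ++ [last] := by simpa [List.concat_eq_append] using hinit0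
    rw [show x :: y :: ys = (x :: init) ++ [last] by simp [hinit]]
    rw [pvMergeStep_concat]
    split
    · -- a new block is appended after the second one
      rw [show (x :: init) ++ [last] ++ [[(pvPair r).1, (pvPair r).2]]
            = x :: y :: (ys ++ [[(pvPair r).1, (pvPair r).2]]) by
          simp only [List.cons_append, ← List.append_assoc, ← hinit]]
      exact ih x y _
    · -- the last block's end is extended in place
      cases init with
      | nil =>
        obtain ⟨hy, hys⟩ : y = last ∧ ys = [] := by
          simpa using hinit
        obtain ⟨zs, h1, h2, h3⟩ :=
          ih x [(pvPair last).1, max (pvPair last).2 (pvPair r).2] []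
        exact ⟨zs, h1, h2, by simpa [pvPair, hy] using h3⟩
      | cons i0 irest =>
        have hy : y = i0 := by
          have := hinit
          simp only [List.cons_append] at this
          exact (List.cons_eq_cons.mp this).1
        rw [show (x :: (i0 :: irest)) ++ [[(pvPair last).1, max (pvPair last).2 (pvPair r).2]]
              = x :: i0 :: (irest ++ [[(pvPair last).1, max (pvPair last).2 (pvPair r).2]]) by simp]
        obtain ⟨zs, h1, h2, h3⟩ := ih x i0 _
        exact ⟨zs, h1, h2, by rw [h3, hy]⟩

-- Core lemma: folding the merge step from a single block [[s,e]] and then gap-scanning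
-- equals B's sweep from candidate e; the first block's start stays s.
theorem merge_vs_sweep (rest : List (List Int)) :
    ∀ (s e : Int),
    (pvPair (rest.foldl pvMergeStep [[s, e]]).headI).1 = s ∧
    pvGapScan (rest.foldl pvMergeStep [[s, e]]) = pvSweep rest e := by
  induction rest with
  | nil => intro s e; exact ⟨rfl, rfl⟩
  | cons r rest' ih =>
    intro s e
    show (pvPair (rest'.foldl pvMergeStep (pvMergeStep [[s, e]] r)).headI).1 = s ∧
      pvGapScan (rest'.foldl pvMergeStep (pvMergeStep [[s, e]] r)) = pvSweep (r :: rest') e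
    rcases hpr : pvPair r with ⟨rs, re⟩
    have hstep := pvMergeStep_concat [] [s, e] r
    rw [hpr] at hstep
    simp only [List.nil_append, pvPair] at hstep
    have hsw : pvSweep (r :: rest') e
        = if rs > e + 1 then e + 1 else pvSweep rest' (if re > e then re else e) := by
      simp only [pvSweep, hpr]
    by_cases hgt : rs > e + 1
    · rw [hstep, if_pos hgt, hsw, if_pos hgt]
      obtain ⟨zs, h1, h2, h3⟩ := foldl_mergeStep_frozen rest' [s, e] [rs, re] []
      rw [show ([[s, e]] ++ [[rs, re]] : List (List Int)) = [s, e] :: [rs, re] :: [] by rfl, h1]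
      obtain ⟨w, ws, hzs⟩ := List.exists_cons_of_ne_nil h2
      subst hzs
      have hw : (pvPair w).1 = rs := by simpa [pvPair] using h3
      constructor
      · simp [pvPair]
      · have hcond : (pvPair [s, e]).2 + 1 < (pvPair w).1 := by
          show e + 1 < (pvPair w).1
          rw [hw]; omega
        simp only [pvGapScan, if_pos hcond]
        show e + 1 = e + 1
        rfl
    · rw [hstep, if_neg hgt, hsw, if_neg hgt]
      have hmax : max e re = (if re > e then re else e) := by
        split <;> omega
      rw [← hmax]
      exact ih s (max e re)

-- ===== VERDICT (by name: the statement is the Claim_ definition above) =====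
theorem find_lowest_unblocked_ip_spec : Claim_equal_find_lowest_unblocked_ip := by
  intro ranges _ hpre
  obtain ⟨hne, _⟩ := hpre
  unfold Spec_find_lowest_unblocked_ip find_lowest_unblocked_ip find_lowest_unblocked_ip_alt merge_ranges
  have hsne : PySem.List.sorted ranges (key := fun x => x.headI) ≠ [] := by
    simpa [PySem.List.sorted_eq_nil_iff] using hne
  obtain ⟨r0, rest, hs⟩ := List.exists_cons_of_ne_nil hsne
  rw [hs]
  have hstep0 : pvMergeStep [] r0 = [[(pvPair r0).1, (pvPair r0).2]] := by
    simp [pvMergeStep]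
  simp only [List.foldl_cons, hstep0, List.headI_cons, List.tail_cons]
  obtain ⟨h1, h2⟩ := merge_vs_sweep rest (pvPair r0).1 (pvPair r0).2
  rw [h1, h2]
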